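-- pv_equiv track=rewrite | github.com/unfashion8/makaren | numerology.py | _reduce_to_one_digit_for_cycle
-- ===== SOURCE A (Python) =====
-- def _reduce_to_one_digit_for_cycle(n: int) -> int:
--     if n <= 0:
--         return 1
--     for _ in range(20):
--         if n <= 9:
--             return n
--         if n == 11:
--             return 2
--         if n == 22:
--             return 4
--         n = sum(int(d) for d in str(n))
--     return n if 1 <= n <= 9 else 1
-- ===== SOURCE B (Python) =====
-- def _reduce_to_one_digit_for_cycle(n: int) -> int:
--     if n <= 0:
--         return 1
--     return 1 + (n - 1) % 9
-- ===== Notes on version B (the rewrite author's own statement) =====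
-- stated objective: simpler
-- what changed: Replaces the 20-iteration string-based digit-sum loop (with master-number cases 11->2 and 22->4, which coincide with the digital root) by the closed-form digital root 1 + (n-1) % 9 after the same n <= 0 guard.
import Mathlib
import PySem

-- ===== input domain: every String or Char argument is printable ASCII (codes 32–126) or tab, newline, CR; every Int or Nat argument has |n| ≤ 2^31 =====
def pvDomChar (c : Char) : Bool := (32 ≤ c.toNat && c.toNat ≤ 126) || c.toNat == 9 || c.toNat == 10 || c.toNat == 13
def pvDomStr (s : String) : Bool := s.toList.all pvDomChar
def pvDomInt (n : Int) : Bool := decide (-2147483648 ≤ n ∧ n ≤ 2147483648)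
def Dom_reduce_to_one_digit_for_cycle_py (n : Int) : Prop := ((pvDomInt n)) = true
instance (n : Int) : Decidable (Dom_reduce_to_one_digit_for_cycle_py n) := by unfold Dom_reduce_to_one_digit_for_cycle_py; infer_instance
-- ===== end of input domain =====

-- B replaces A's capped digit-sum loop (with inert master-number cases 11→2, 22→4) by the
-- digital-root closed form 1 + (n-1) % 9; objective: simpler.

-- ===== PORT A =====
-- sum(int(d) for d in str(n)); only reached with n ≥ 10, where every char of str(n) is a
-- digit, so int(d) never raises — the `.getD 0` default is never taken there.
def pyDigitSum (n : Int) : Int :=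
  (((PySem.Int.toStr n).toList).map (fun c => (PySem.Int.ofChars? [c]).getD 0)).sum

-- `for _ in range(20)` with early returns, then `return n if 1 <= n <= 9 else 1`
def reduceLoop : Nat → Int → Int
  | 0, n => if 1 ≤ n ∧ n ≤ 9 then n else 1
  | f+1, n =>
    if n ≤ 9 then n
    else if n = 11 then 2
    else if n = 22 then 4
    else reduceLoop f (pyDigitSum n)

def reduce_to_one_digit_for_cycle_py (n : Int) : Int :=
  if n ≤ 0 then 1 else reduceLoop 20 n

-- ===== PORT B =====
def reduce_to_one_digit_for_cycle_py_alt (n : Int) : Int :=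
  if n ≤ 0 then 1 else 1 + PySem.Int.mod (n - 1) 9

-- ===== PRECONDITION & SPEC =====
def Spec_reduce_to_one_digit_for_cycle_py (n : Int) (out : Int) : Prop := out = reduce_to_one_digit_for_cycle_py_alt n
instance (n : Int) (out : Int) : Decidable (Spec_reduce_to_one_digit_for_cycle_py n out) := by unfold Spec_reduce_to_one_digit_for_cycle_py; infer_instance

-- ===== CLAIM (what is proved, stated in full; the proofs are below) =====
def Claim_equal_reduce_to_one_digit_for_cycle_py : Prop := ∀ (n : Int), Dom_reduce_to_one_digit_for_cycle_py n → Spec_reduce_to_one_digit_for_cycle_py n (reduce_to_one_digit_for_cycle_py n)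

-- ===== LEMMAS AND PROOFS =====

-- int('d') of a single decimal digit char
theorem chVal_digitChar : ∀ d : Nat, d < 10 → (PySem.Int.ofChars? [Nat.digitChar d]).getD 0 = (d : Int) := by
  decide

-- the char-wise digit sum of `Nat.toDigitsCore` is the sum of `Nat.digits`
theorem toDigitsCore_sum (f : Nat) : ∀ (m : Nat) (ds : List Char), m < f →
    ((Nat.toDigitsCore 10 f m ds).map (fun c => (PySem.Int.ofChars? [c]).getD 0)).sum
      = ((Nat.digits 10 m).sum : Int) + ((ds.map (fun c => (PySem.Int.ofChars? [c]).getD 0)).sum) := by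
  induction f with
  | zero => intro m ds h; omega
  | succ f ih =>
    intro m ds _
    show ((if m / 10 = 0 then (m % 10).digitChar :: ds
            else Nat.toDigitsCore 10 f (m / 10) ((m % 10).digitChar :: ds)).map
            (fun c => (PySem.Int.ofChars? [c]).getD 0)).sum = _
    by_cases h0 : m / 10 = 0
    · rcases Nat.eq_zero_or_pos m with hm | hm
      · subst hm; simp [h0, chVal_digitChar 0 (by norm_num)]
      · have hlt : m < 10 := by omega
        rw [if_pos h0, Nat.digits_def' (b := 10) (by norm_num) hm]
        have : m / 10 = 0 := h0
        simp only [List.map_cons, List.sum_cons, this, Nat.digits_zero, List.sum_nil,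
          chVal_digitChar (m % 10) (by omega)]
        push_cast
        ring
    · have hm : 0 < m := by omega
      rw [if_neg h0, ih (m / 10) _ (by omega),
        Nat.digits_def' (b := 10) (by norm_num) hm]
      simp only [List.map_cons, List.sum_cons, List.sum_cons,
        chVal_digitChar (m % 10) (by omega)]
      push_cast
      ring

theorem pyDigitSum_eq (n : Int) (h : 0 ≤ n) :
    pyDigitSum n = ((Nat.digits 10 n.toNat).sum : Int) := by
  unfold pyDigitSum
  rw [PySem.Int.toList_toStr]
  unfold PySem.Int.toChars
  rw [if_neg (by omega)]
  have := toDigitsCore_sum (n.toNat + 1) n.toNat [] (by omega)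
  simpa [Nat.toDigits] using this

-- the digit sum of a positive number is positive
theorem ofDigits_zero_sum : ∀ l : List Nat, l.sum = 0 → Nat.ofDigits 10 l = 0 := by
  intro l
  induction l with
  | nil => simp
  | cons a t ih =>
    intro h
    simp only [List.sum_cons] at h
    have ha : a = 0 ∧ t.sum = 0 := by
      constructor <;> omega
    simp [Nat.ofDigits, ha.1, ih ha.2]

theorem digits_sum_pos (m : Nat) (hm : 1 ≤ m) : 1 ≤ (Nat.digits 10 m).sum := by
  by_contra h
  have h0 : (Nat.digits 10 m).sum = 0 := by omega
  have := ofDigits_zero_sum (Nat.digits 10 m) h0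
  rw [Nat.ofDigits_digits] at this
  omega

-- all 99 trajectories from 1..99 with fuel 19 and 20, by evaluation
theorem small19 : ∀ m : Nat, m < 99 →
    reduceLoop 19 ((m : Int) + 1) = 1 + (((m : Int) + 1) - 1) % 9 := by
  decide

theorem small20 : ∀ m : Nat, m < 99 →
    reduceLoop 20 ((m : Int) + 1) = 1 + (((m : Int) + 1) - 1) % 9 := by
  decide

-- ===== VERDICT (by name: the statement is the Claim_ definition above) =====
theorem reduce_to_one_digit_for_cycle_py_spec : Claim_equal_reduce_to_one_digit_for_cycle_py := by
  unfold Claim_equal_reduce_to_one_digit_for_cycle_py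
  intro n hdom
  unfold Dom_reduce_to_one_digit_for_cycle_py pvDomInt at hdom
  have hb : -2147483648 ≤ n ∧ n ≤ 2147483648 := by
    simpa using hdom
  unfold Spec_reduce_to_one_digit_for_cycle_py
  unfold reduce_to_one_digit_for_cycle_py reduce_to_one_digit_for_cycle_py_alt
  by_cases hn : n ≤ 0
  · simp [hn]
  · rw [if_neg hn, if_neg hn, PySem.Int.mod_eq_emod_of_pos (by norm_num)]
    have h1 : 1 ≤ n := by omega
    by_cases hsmall : n ≤ 99
    · have := small20 (n - 1).toNat (by omega)
      have hc : ((n - 1).toNat : Int) + 1 = n := by omega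
      rw [hc] at this
      exact this
    · -- n ≥ 100: one digit-sum step lands in 1..90, then the small-case evaluation applies
      have h100 : 100 ≤ n := by omega
      show reduceLoop (19 + 1) n = _
      rw [reduceLoop, if_neg (by omega), if_neg (by omega), if_neg (by omega)]
      have hps : pyDigitSum n = ((Nat.digits 10 n.toNat).sum : Int) :=
        pyDigitSum_eq n (by omega)
      set S := (Nat.digits 10 n.toNat).sum with hS
      have hS1 : 1 ≤ S := digits_sum_pos n.toNat (by omega)
      have hlen : (Nat.digits 10 n.toNat).length ≤ 10 := by
        rw [Nat.digits_length_le_iff (by norm_num)]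
        omega
      have hSle : S ≤ 90 := by
        have := List.sum_le_card_nsmul (Nat.digits 10 n.toNat) 9
          (fun x hx => by have := Nat.digits_lt_base (by norm_num) hx; omega)
        simp only [smul_eq_mul] at this
        calc S ≤ (Nat.digits 10 n.toNat).length * 9 := this
          _ ≤ 10 * 9 := by omega
          _ = 90 := by norm_num
      have hmod : n.toNat % 9 = S % 9 := Nat.modEq_digits_sum 9 10 (by norm_num) n.toNat
      have hmodI : n % 9 = (S : Int) % 9 := by omega
      have := small19 (S - 1) (by omega)
      have hc : (((S - 1 : Nat)) : Int) + 1 = (S : Int) := by omega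
      rw [hc] at this
      rw [hps, this]
      omega
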